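-- pv_equiv track=rewrite | github.com/baolamabcd13/khoi | steganography.py | extract_message_from_text
-- ===== SOURCE A (Python) =====
-- def extract_message_from_text(text):
--     """
--     Trích xuất tin từ case của các ký tự
--     """
--     # Lấy chuỗi bit từ case của các ký tự
--     binary = ''
--     for char in text:
--         if char.isalpha():
--             binary += '1' if char.isupper() else '0'
--
--     # Chuyển binary thành text
--     message = ''
--     for i in range(0, len(binary) - (len(binary) % 8), 8):
--         byte = binary[i:i+8]
--         try:
--             message += chr(int(byte, 2))
--         except ValueError:
--             break
--
--     return message
-- ===== SOURCE B (Python) =====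
-- def extract_message_from_text(text):
--     """
--     Trich xuat tin tu case cua cac ky tu
--     """
--     chars = []
--     value = 0
--     count = 0
--     for char in text:
--         if char.isalpha():
--             value = value * 2 + (1 if char.isupper() else 0)
--             count += 1
--             if count == 8:
--                 chars.append(chr(value))
--                 value = 0
--                 count = 0
--     return ''.join(chars)
-- ===== Notes on version B (the rewrite author's own statement) =====
-- stated objective: simpler
-- what changed: Replaces the build-a-full-bit-string-then-slice-bytes two-phase approach by one streaming pass that keeps a running integer byte accumulator and a bit counter, emitting a character every 8 alphabetic letters; the intermediate binary string, the slicing loop and the unreachable try/except disappear.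
import Mathlib
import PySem

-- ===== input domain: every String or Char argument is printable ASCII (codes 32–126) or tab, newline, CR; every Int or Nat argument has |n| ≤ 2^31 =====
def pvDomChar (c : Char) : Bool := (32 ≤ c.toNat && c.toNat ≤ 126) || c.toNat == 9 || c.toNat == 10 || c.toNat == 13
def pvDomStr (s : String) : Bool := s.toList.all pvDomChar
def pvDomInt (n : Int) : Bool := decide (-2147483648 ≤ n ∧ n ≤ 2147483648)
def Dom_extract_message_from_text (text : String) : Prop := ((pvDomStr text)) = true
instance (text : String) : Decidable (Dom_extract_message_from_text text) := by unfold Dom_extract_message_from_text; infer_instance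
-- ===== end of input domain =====

-- B replaces A's build-full-bit-string-then-slice-bytes phases by one streaming pass with an
-- integer byte accumulator and a bit counter (objective: simpler; same O(n) cost).

-- ===== PORT A =====
-- int(byte, 2): exact for the nonempty '0'/'1' strings A feeds it (any other char would give none,
-- matching ValueError, but never occurs here).
def pvParseBin? (cs : List Char) : Option Int :=
  cs.foldl (fun acc c =>
    match acc with
    | none => none
    | some v => if c = '0' then some (v * 2) else if c = '1' then some (v * 2 + 1) else none)
    (some 0)

def extract_message_from_text (text : String) : String :=
  -- phase 1: binary += '1'/'0' per alphabetic char
  let binary : List Char := text.toList.foldl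
    (fun b c => if PySem.Chars.isalpha c then b ++ [if PySem.Chars.isupper c then '1' else '0'] else b) []
  let L : Int := (binary.length : Int)
  -- phase 2: for i in range(0, len(binary) - len(binary) % 8, 8): byte = binary[i:i+8]; try chr(int(byte,2)) except break
  let res := (PySem.List.pyRange 0 (L - PySem.Int.mod L 8) 8).foldl
    (fun (st : List Char × Bool) i =>
      match st with
      | (msg, true) =>
        match pvParseBin? (PySem.List.slice binary (some i) (some (i + 8))) with
        | some v => (msg ++ [Char.ofNat v.toNat], true)   -- chr(int(byte, 2))
        | none => (msg, false)                            -- except ValueError: break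
      | (msg, false) => (msg, false))
    ([], true)
  String.mk res.1

-- ===== PORT B =====
-- loop body of Source B (value, count, chars)
def pvBStep (st : Int × Int × List Char) (c : Char) : Int × Int × List Char :=
  if PySem.Chars.isalpha c then
    let value := st.1 * 2 + (if PySem.Chars.isupper c then 1 else 0)
    let count := st.2.1 + 1
    if count = 8 then (0, 0, st.2.2 ++ [Char.ofNat value.toNat])
    else (value, count, st.2.2)
  else st

def extract_message_from_text_alt (text : String) : String :=
  let st := text.toList.foldl pvBStep (0, 0, [])
  String.mk st.2.2

-- ===== PRECONDITION & SPEC =====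
def Spec_extract_message_from_text (text : String) (out : String) : Prop := out = extract_message_from_text_alt text
instance (text : String) (out : String) : Decidable (Spec_extract_message_from_text text out) := by unfold Spec_extract_message_from_text; infer_instance

-- ===== CLAIM (what is proved, stated in full; the proofs are below) =====
def Claim_equal_extract_message_from_text : Prop := ∀ (text : String), Dom_extract_message_from_text text → Spec_extract_message_from_text text (extract_message_from_text text)

-- ===== LEMMAS AND PROOFS =====

-- the hidden bit stream of a text
def pvBits (cs : List Char) : List Bool :=
  cs.filterMap (fun c => if PySem.Chars.isalpha c then some (PySem.Chars.isupper c) else none)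

def pvBitChar (b : Bool) : Char := if b then '1' else '0'

def pvVal (v : Int) (bs : List Bool) : Int :=
  bs.foldl (fun v b => v * 2 + (if b then 1 else 0)) v

-- reference result: decode the bit stream byte by byte
def pvChunks (bs : List Bool) : List Char :=
  if _h : 8 ≤ bs.length then
    Char.ofNat (pvVal 0 (bs.take 8)).toNat :: pvChunks (bs.drop 8)
  else []
  termination_by bs.length
  decreasing_by simp; omega

theorem pvChunks_small {bs : List Bool} (h : bs.length < 8) : pvChunks bs = [] := by
  rw [pvChunks]; simp [Nat.not_le.mpr h]

theorem pvChunks_big {bs : List Bool} (h : 8 ≤ bs.length) :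
    pvChunks bs = Char.ofNat (pvVal 0 (bs.take 8)).toNat :: pvChunks (bs.drop 8) := by
  rw [pvChunks]; simp [h]

-- B's loop body restricted to the bit stream
def pvBit (st : Int × Int × List Char) (b : Bool) : Int × Int × List Char :=
  if st.2.1 + 1 = 8 then (0, 0, st.2.2 ++ [Char.ofNat (st.1 * 2 + (if b then 1 else 0)).toNat])
  else (st.1 * 2 + (if b then 1 else 0), st.2.1 + 1, st.2.2)

theorem pvB_invariant (bs : List Bool) (p : List Bool) (msg : List Char) (hp : p.length < 8) :
    (bs.foldl pvBit (pvVal 0 p, (p.length : Int), msg)).2.2 = msg ++ pvChunks (p ++ bs) := by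
  induction bs generalizing p msg with
  | nil =>
    simp [pvChunks_small (by simpa using hp)]
  | cons b bs ih =>
    have hval : pvVal 0 p * 2 + (if b then (1 : Int) else 0) = pvVal 0 (p ++ [b]) := by
      simp [pvVal]
    have hstep : pvBit (pvVal 0 p, (p.length : Int), msg) b
        = if (p.length : Int) + 1 = 8 then (0, 0, msg ++ [Char.ofNat (pvVal 0 (p ++ [b])).toNat])
          else (pvVal 0 (p ++ [b]), (p.length : Int) + 1, msg) := by
      simp only [pvBit, hval]
    rw [List.foldl_cons, hstep]
    by_cases h8 : (p.length : Int) + 1 = 8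
    · rw [if_pos h8]
      have hlen : (p ++ [b]).length = 8 := by simp; omega
      have h2 := ih [] (msg ++ [Char.ofNat (pvVal 0 (p ++ [b])).toNat]) (by simp)
      simp only [List.length_nil, Nat.cast_zero, List.nil_append,
        show pvVal 0 [] = 0 from rfl] at h2
      rw [h2, show p ++ b :: bs = (p ++ [b]) ++ bs from by simp,
        pvChunks_big (bs := (p ++ [b]) ++ bs) (by simp; omega)]
      have htake : ((p ++ [b]) ++ bs).take 8 = p ++ [b] := by
        rw [List.take_append_of_le_length (by omega), ← hlen, List.take_length]
      have hdrop : ((p ++ [b]) ++ bs).drop 8 = bs := by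
        rw [List.drop_append_of_le_length (by omega)]
        simp [hlen]
      rw [htake, hdrop]
      simp
    · rw [if_neg h8]
      have hc : (((p ++ [b]).length : Nat) : Int) = (p.length : Int) + 1 := by simp
      rw [← hc, ih (p ++ [b]) msg (by simp; omega)]
      simp

theorem pvB_chars (cs : List Char) (st : Int × Int × List Char) :
    cs.foldl pvBStep st = (pvBits cs).foldl pvBit st := by
  induction cs generalizing st with
  | nil => simp [pvBits]
  | cons c cs ih =>
    by_cases h : PySem.Chars.isalpha c = true
    · simp only [pvBits, List.filterMap_cons, h, List.foldl_cons]
      have : pvBStep st c = pvBit st (PySem.Chars.isupper c) := by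
        simp [pvBStep, pvBit, h]
      rw [this, ih]
      rfl
    · simp only [pvBits, List.filterMap_cons, h, List.foldl_cons]
      have : pvBStep st c = st := by simp [pvBStep, h]
      rw [this, ih]
      rfl

theorem pvB_eq (text : String) :
    extract_message_from_text_alt text = String.mk (pvChunks (pvBits text.toList)) := by
  simp only [extract_message_from_text_alt]
  rw [pvB_chars]
  have h2 := pvB_invariant (pvBits text.toList) [] [] (by simp)
  simp only [List.length_nil, Nat.cast_zero, List.nil_append,
    show pvVal 0 [] = 0 from rfl] at h2
  rw [h2]

-- ---- A side ----

theorem pvA_binary (cs : List Char) (acc : List Char) :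
    cs.foldl (fun b c => if PySem.Chars.isalpha c then b ++ [if PySem.Chars.isupper c then '1' else '0'] else b) acc
      = acc ++ (pvBits cs).map pvBitChar := by
  induction cs generalizing acc with
  | nil => simp [pvBits]
  | cons c cs ih =>
    by_cases h : PySem.Chars.isalpha c = true <;>
      simp [pvBits, h, ih, pvBitChar]

theorem pvParseBin?_bits (bs : List Bool) (v : Int) :
    (bs.map pvBitChar).foldl (fun acc c =>
      match acc with
      | none => none
      | some v => if c = '0' then some (v * 2) else if c = '1' then some (v * 2 + 1) else none)
      (some v) = some (pvVal v bs) := by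
  induction bs generalizing v with
  | nil => simp [pvVal]
  | cons b bs ih =>
    cases b <;> simp only [List.map_cons, List.foldl_cons, pvBitChar, if_true] <;>
      simpa [pvVal, show ('1' : Char) ≠ '0' from by decide] using ih _

theorem pvParseBin?_map (bs : List Bool) :
    pvParseBin? (bs.map pvBitChar) = some (pvVal 0 bs) :=
  pvParseBin?_bits bs 0

-- A's byte loop body, indexed by the chunk number
def pvAStep (bs : List Bool) (st : List Char × Bool) (k : Nat) : List Char × Bool :=
  match st with
  | (m, true) =>
    match pvParseBin? (((bs.map pvBitChar).drop (8 * k)).take 8) with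
    | some v => (m ++ [Char.ofNat v.toNat], true)
    | none => (m, false)
  | (m, false) => (m, false)

theorem pvAStep_shift (bs : List Bool) (st : List Char × Bool) (k : Nat) :
    pvAStep bs st (Nat.succ k) = pvAStep (bs.drop 8) st k := by
  obtain ⟨m, flag⟩ := st
  have hd : (bs.map pvBitChar).drop (8 * Nat.succ k) = ((bs.drop 8).map pvBitChar).drop (8 * k) := by
    rw [List.map_drop, List.drop_drop]
    congr 1
    omega
  cases flag
  · rfl
  · simp only [pvAStep, hd]

theorem pvAStep_zero (bs : List Bool) (m : List Char) :
    pvAStep bs (m, true) 0 = (m ++ [Char.ofNat (pvVal 0 (bs.take 8)).toNat], true) := by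
  have hb : ((bs.map pvBitChar).drop (8 * 0)).take 8 = (bs.take 8).map pvBitChar := by
    simp [List.map_take]
  simp only [pvAStep, hb, pvParseBin?_map]

theorem pvA_loop (K : Nat) (bs : List Bool) (msg : List Char) (hK : bs.length / 8 = K) :
    ((List.range K).foldl (pvAStep bs) (msg, true)).1 = msg ++ pvChunks bs := by
  induction K generalizing bs msg with
  | zero =>
    have : bs.length < 8 := by omega
    simp [pvChunks_small this]
  | succ K ih =>
    have h8 : 8 ≤ bs.length := by omega
    rw [List.range_succ_eq_map, List.foldl_cons, List.foldl_map, pvAStep_zero,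
      funext (fun st => funext (fun k => pvAStep_shift bs st k)),
      ih (bs.drop 8) _ (by simp; omega), pvChunks_big h8]
    simp

theorem pvA_eq (text : String) :
    extract_message_from_text text = String.mk (pvChunks (pvBits text.toList)) := by
  simp only [extract_message_from_text]
  rw [pvA_binary]
  simp only [List.nil_append]
  set bs := pvBits text.toList with hbs
  set l := bs.map pvBitChar with hl
  set n := bs.length with hn
  have hlen : l.length = n := by simp [hl, hn]
  have hmod : ((l.length : Int)) - PySem.Int.mod (l.length : Int) 8 = ((8 * (n / 8) : Nat) : Int) := by
    have hm : PySem.Int.mod ((n : Nat) : Int) 8 = ((n % 8 : Nat) : Int) := by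
      exact_mod_cast PySem.Int.mod_natCast n 8
    rw [hlen, hm]
    push_cast
    omega
  rw [hmod]
  have hrange : PySem.List.pyRange 0 ((8 * (n / 8) : Nat) : Int) 8
      = (List.range (n / 8)).map (fun k => ((8 * k : Nat) : Int)) := by
    rw [PySem.List.pyRange_of_pos 0 _ (by norm_num)]
    by_cases h : (0 : Int) < ((8 * (n / 8) : Nat) : Int)
    · rw [if_pos h]
      have he : ((((8 * (n / 8) : Nat) : Int)) - 0 + 8 - 1) / 8 = ((n / 8 : Nat) : Int) := by
        push_cast
        omega
      rw [he]
      simp only [Int.toNat_natCast]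
      apply List.map_congr_left
      intro k _
      push_cast
      ring
    · rw [if_neg h]
      have h0 : n / 8 = 0 := by omega
      simp [h0]
  rw [hrange, List.foldl_map]
  have hsl : ∀ k : Nat,
      PySem.List.slice l (some ((8 * k : Nat) : Int)) (some (((8 * k : Nat) : Int) + 8))
        = (l.drop (8 * k)).take 8 := by
    intro k
    rw [PySem.List.slice_toNat l (by positivity) (by positivity)]
    congr 1
    · omega
  rw [show ((fun (st : List Char × Bool) (k : Nat) =>
        match st with
        | (m, true) =>
          match pvParseBin? (PySem.List.slice l (some ((8 * k : Nat) : Int)) (some (((8 * k : Nat) : Int) + 8))) with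
          | some v => (m ++ [Char.ofNat v.toNat], true)
          | none => (m, false)
        | (m, false) => (m, false)) : List Char × Bool → Nat → List Char × Bool) = pvAStep bs from
    funext fun st => funext fun k => by
      obtain ⟨m, flag⟩ := st
      cases flag
      · rfl
      · simp only [pvAStep, ← hl, hsl k]]
  rw [pvA_loop (n / 8) bs [] rfl]
  simp

-- ===== VERDICT (by name: the statement is the Claim_ definition above) =====
theorem extract_message_from_text_spec : Claim_equal_extract_message_from_text := by
  intro text _
  unfold Spec_extract_message_from_text
  rw [pvA_eq, pvB_eq]
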